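-- pv_equiv track=rewrite | github.com/adrianfrancof/kibernum-data-science | string_challenge.py | StringChallenge
-- ===== SOURCE A (Python) =====
-- def StringChallenge(strParam):
--     # Variable requerida para el desafío
--     varOcg = strParam
--
--     # code goes here
--     try:
--         patron, cadena = varOcg.strip().split(' ', 1)
--     except ValueError:
--         return "false"
--
--     # Procesar patrón carácter por carácter
--     pos_cadena = 0
--     i = 0
--
--     while i < len(patron) and pos_cadena < len(cadena):
--         c = patron[i]
--
--         if c == '+':
--             # Debe ser una letra
--             if not cadena[pos_cadena].isalpha():
--                 return "false"
--             pos_cadena += 1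
--             i += 1
--
--         elif c == '$':
--             # Debe ser un dígito del 1-9
--             if not (cadena[pos_cadena].isdigit() and cadena[pos_cadena] != '0'):
--                 return "false"
--             pos_cadena += 1
--             i += 1
--
--         elif c == '*':
--             # Verificar si sigue {N}
--             if i + 1 < len(patron) and patron[i+1] == '{':
--                 j = i + 2
--                 n_str = ""
--                 while j < len(patron) and patron[j] != '}':
--                     n_str += patron[j]
--                     j += 1
--                 if j < len(patron) and n_str.isdigit():
--                     n = int(n_str)
--                     if n >= 1 and pos_cadena + n <= len(cadena):
--                         # Verificar que todos los caracteres sean iguales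
--                         primer_char = cadena[pos_cadena]
--                         for k in range(n):
--                             if cadena[pos_cadena + k] != primer_char:
--                                 return "false"
--                         pos_cadena += n
--                     else:
--                         return "false"
--                     i = j + 1
--                 else:
--                     return "false"
--             else:
--                 # Secuencia de 3 caracteres iguales
--                 if pos_cadena + 3 <= len(cadena):
--                     primer_char = cadena[pos_cadena]
--                     if (cadena[pos_cadena] == primer_char and
--                         cadena[pos_cadena + 1] == primer_char and
--                         cadena[pos_cadena + 2] == primer_char):
--                         pos_cadena += 3
--                     else:
--                         return "false"
--                 else:
--                     return "false"
--                 i += 1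
--         else:
--             # Caracter desconocido
--             return "false"
--
--     # Verificar que hayamos consumido todo el patrón y toda la cadena
--     if i == len(patron) and pos_cadena == len(cadena):
--         return "true"
--     else:
--         return "false"
-- ===== SOURCE B (Python) =====
-- def StringChallenge(strParam):
--     # two-phase: tokenize the whole pattern first, then run the tokens over the string
--     try:
--         patron, cadena = strParam.strip().split(' ', 1)
--     except ValueError:
--         return "false"
--
--     tokens = _tokenize(patron)
--     if tokens is None:
--         return "false"
--
--     pos = 0
--     for t in tokens:
--         if t == '+':
--             if pos >= len(cadena) or not cadena[pos].isalpha():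
--                 return "false"
--             pos += 1
--         elif t == '$':
--             if pos >= len(cadena) or not (cadena[pos].isdigit() and cadena[pos] != '0'):
--                 return "false"
--             pos += 1
--         else:
--             n = t
--             if pos + n > len(cadena) or cadena[pos:pos + n] != cadena[pos] * n:
--                 return "false"
--             pos += n
--     return "true" if pos == len(cadena) else "false"
--
--
-- def _tokenize(p):
--     """Pattern -> list of tokens ('+', '$', or a repeat count); None if malformed."""
--     tokens = []
--     i = 0
--     while i < len(p):
--         c = p[i]
--         if c == '+':
--             tokens.append('+')
--             i += 1
--         elif c == '$':
--             tokens.append('$')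
--             i += 1
--         elif c == '*':
--             if i + 1 < len(p) and p[i + 1] == '{':
--                 j = i + 2
--                 while j < len(p) and p[j] != '}':
--                     j += 1
--                 if j == len(p):
--                     return None
--                 body = p[i + 2:j]
--                 if not body.isdigit() or int(body) < 1:
--                     return None
--                 tokens.append(int(body))
--                 i = j + 1
--             else:
--                 tokens.append(3)
--                 i += 1
--         else:
--             return None
--     return tokens
-- ===== Notes on version B (the rewrite author's own statement) =====
-- stated objective: alternative
-- what changed: A interleaves pattern parsing with string matching in one while-loop over two cursors; B first tokenizes the whole pattern into a token list ('+', '$', repeat-count) and then runs a separate matching pass of the token list over the string.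
import Mathlib
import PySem

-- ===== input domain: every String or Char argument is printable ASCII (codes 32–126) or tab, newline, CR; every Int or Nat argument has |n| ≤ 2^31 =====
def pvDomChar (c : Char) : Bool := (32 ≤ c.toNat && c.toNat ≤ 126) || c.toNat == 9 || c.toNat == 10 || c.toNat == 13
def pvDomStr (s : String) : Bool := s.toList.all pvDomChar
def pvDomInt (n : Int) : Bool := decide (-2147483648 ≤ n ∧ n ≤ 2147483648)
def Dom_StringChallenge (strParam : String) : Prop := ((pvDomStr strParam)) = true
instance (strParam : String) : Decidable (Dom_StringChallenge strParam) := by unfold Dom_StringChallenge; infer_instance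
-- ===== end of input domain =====

-- B re-implements A's single interleaved parse-and-match loop as a two-phase tokenize-then-match
-- pass (objective: alternative decomposition, same cost); return values proved equal on all inputs.

-- ===== PORT A =====

-- tiny measure lemmas cited by the ports' `decreasing_by` (keeps termination proofs small)
theorem SC_decA (len pos d : Nat) (h1 : pos < len) (h2 : 0 < d) :
    len - (pos + d) < len - pos := by omega
theorem SC_decB (len i j : Nat) (h1 : i ≤ j) (h2 : i < len) :
    len - (j + 1) < len - i := by omega
theorem SC_decC (len pos : Nat) (n : Int) (h1 : pos < len) (h2 : 1 ≤ n) :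
    len - (pos + n.toNat) < len - pos := by omega

-- the inner `while j < len(patron) and patron[j] != '}': n_str += patron[j]; j += 1` loop of A
def SCa_scanBrace (patron : List Char) (j : Nat) (nstr : List Char) : Nat × List Char :=
  if _h : j < patron.length then
    if patron.getD j ' ' = '}' then (j, nstr)
    else SCa_scanBrace patron (j + 1) (nstr ++ [patron.getD j ' '])
  else (j, nstr)
  termination_by patron.length - j
  decreasing_by exact SC_decB _ _ _ (Nat.le_refl j) _h

-- A's main `while i < len(patron) and pos_cadena < len(cadena)` loop; the final
-- `i == len(patron) and pos_cadena == len(cadena)` check is the loop-exit branch.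
def SCa_loop (patron cadena : List Char) (i pos : Nat) : String :=
  if _h : i < patron.length ∧ pos < cadena.length then
    if patron.getD i ' ' = '+' then
      if !(PySem.Chars.isalpha (cadena.getD pos ' ')) then "false"
      else SCa_loop patron cadena (i + 1) (pos + 1)
    else if patron.getD i ' ' = '$' then
      if !(PySem.Chars.isdigit (cadena.getD pos ' ') && !(cadena.getD pos ' ' == '0')) then "false"
      else SCa_loop patron cadena (i + 1) (pos + 1)
    else if patron.getD i ' ' = '*' then
      if i + 1 < patron.length ∧ patron.getD (i + 1) ' ' = '{' then
        if (SCa_scanBrace patron (i + 2) []).1 < patron.length ∧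
           PySem.Chars.strIsdigit (SCa_scanBrace patron (i + 2) []).2 then
          -- n = int(n_str); the `none` arm is unreachable (n_str.isdigit() holds)
          match PySem.Int.ofChars? (SCa_scanBrace patron (i + 2) []).2 with
          | some n =>
            if 1 ≤ n ∧ (pos : Int) + n ≤ (cadena.length : Int) then
              -- `for k in range(n): if cadena[pos+k] != primer_char: return "false"`
              if (List.range n.toNat).all (fun k => cadena.getD (pos + k) ' ' == cadena.getD pos ' ') then
                SCa_loop patron cadena ((SCa_scanBrace patron (i + 2) []).1 + 1) (pos + n.toNat)
              else "false"
            else "false"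
          | none => "false"
        else "false"
      else
        if pos + 3 ≤ cadena.length then
          if cadena.getD pos ' ' == cadena.getD pos ' ' &&
             cadena.getD (pos + 1) ' ' == cadena.getD pos ' ' &&
             cadena.getD (pos + 2) ' ' == cadena.getD pos ' ' then
            SCa_loop patron cadena (i + 1) (pos + 3)
          else "false"
        else "false"
    else "false"
  else
    if i = patron.length ∧ pos = cadena.length then "true" else "false"
  termination_by cadena.length - pos
  decreasing_by
  · exact SC_decA _ _ _ _h.2 Nat.one_pos
  · exact SC_decA _ _ _ _h.2 Nat.one_pos
  · rename_i hok hall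
    exact SC_decC _ _ _ _h.2 hok.1
  · exact SC_decA _ _ _ _h.2 (Nat.succ_pos 2)

def StringChallenge (strParam : String) : String :=
  -- patron, cadena = strParam.strip().split(' ', 1); ValueError (≠ 2 pieces) -> "false"
  match PySem.Chars.splitMax? (PySem.Chars.strip strParam.toList) [' '] 1 with
  | some [patron, cadena] => SCa_loop patron cadena 0 0
  | _ => "false"

-- ===== PORT B =====

inductive SCTok where
  | plus : SCTok
  | dollar : SCTok
  | rep : Nat → SCTok
deriving DecidableEq, Repr

-- B's inner `while j < len(p) and p[j] != '}': j += 1` scan (returns the stop index)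
def SCb_scanClose (p : List Char) (j : Nat) : Nat :=
  if _h : j < p.length then
    if p.getD j ' ' = '}' then j else SCb_scanClose p (j + 1)
  else j
  termination_by p.length - j
  decreasing_by exact SC_decB _ _ _ (Nat.le_refl j) _h

-- needed by SCb_tokenize's termination proof
theorem SCb_scanClose_ge (p : List Char) (j : Nat) : j ≤ SCb_scanClose p j := by
  induction j using SCb_scanClose.induct p with
  | case1 j h hbrace => rw [SCb_scanClose]; rw [dif_pos h, if_pos hbrace]
  | case2 j h hbrace ih => rw [SCb_scanClose]; rw [dif_pos h, if_neg hbrace]; omega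
  | case3 j h => rw [SCb_scanClose]; simp [h]

-- B's `_tokenize` while-loop (tokens list = accumulator; None = malformed pattern)
def SCb_tokenize (p : List Char) (i : Nat) (acc : List SCTok) : Option (List SCTok) :=
  if _h : i < p.length then
    if p.getD i ' ' = '+' then SCb_tokenize p (i + 1) (acc ++ [SCTok.plus])
    else if p.getD i ' ' = '$' then SCb_tokenize p (i + 1) (acc ++ [SCTok.dollar])
    else if p.getD i ' ' = '*' then
      if i + 1 < p.length ∧ p.getD (i + 1) ' ' = '{' then
        if SCb_scanClose p (i + 2) = p.length then none
        else
          -- body = p[i+2:j] with j = the scan's stop index (0 ≤ i+2 ≤ j ≤ len p)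
          if PySem.Chars.strIsdigit ((p.drop (i + 2)).take (SCb_scanClose p (i + 2) - (i + 2))) then
            -- n = int(body); the `none` arm is unreachable (body.isdigit() holds)
            match PySem.Int.ofChars? ((p.drop (i + 2)).take (SCb_scanClose p (i + 2) - (i + 2))) with
            | none => none
            | some n => if n < 1 then none
                        else SCb_tokenize p (SCb_scanClose p (i + 2) + 1) (acc ++ [SCTok.rep n.toNat])
          else none
      else SCb_tokenize p (i + 1) (acc ++ [SCTok.rep 3])
    else none
  else some acc
  termination_by p.length - i
  decreasing_by
  · exact SC_decB _ _ _ (Nat.le_refl i) _h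
  · exact SC_decB _ _ _ (Nat.le_refl i) _h
  · exact SC_decB _ _ _ (le_trans (Nat.le_add_right i 2) (SCb_scanClose_ge p (i + 2))) _h
  · exact SC_decB _ _ _ (Nat.le_refl i) _h

-- B's `for t in tokens` matching pass over the string
def SCb_match (cadena : List Char) (pos : Nat) : List SCTok → String
  | [] => if pos = cadena.length then "true" else "false"
  | SCTok.plus :: ts =>
      if cadena.length ≤ pos ∨ ¬ PySem.Chars.isalpha (cadena.getD pos ' ') then "false"
      else SCb_match cadena (pos + 1) ts
  | SCTok.dollar :: ts =>
      if cadena.length ≤ pos ∨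
         ¬ (PySem.Chars.isdigit (cadena.getD pos ' ') ∧ cadena.getD pos ' ' ≠ '0') then "false"
      else SCb_match cadena (pos + 1) ts
  | SCTok.rep n :: ts =>
      -- `cadena[pos:pos+n] != cadena[pos] * n`
      if cadena.length < pos + n ∨
         ¬ ((cadena.drop pos).take n = List.replicate n (cadena.getD pos ' ')) then "false"
      else SCb_match cadena (pos + n) ts

def StringChallenge_alt (strParam : String) : String :=
  match PySem.Chars.splitMax? (PySem.Chars.strip strParam.toList) [' '] 1 with
  | none => "false"
  | some parts =>
    match parts with
    | [patron, cadena] =>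
      match SCb_tokenize patron 0 [] with
      | none => "false"
      | some ts => SCb_match cadena 0 ts
    | [] => "false"
    | [_] => "false"
    | _ :: _ :: _ :: _ => "false"

-- ===== PRECONDITION & SPEC =====
def Spec_StringChallenge (strParam : String) (out : String) : Prop := out = StringChallenge_alt strParam
instance (strParam : String) (out : String) : Decidable (Spec_StringChallenge strParam out) := by unfold Spec_StringChallenge; infer_instance

-- ===== CLAIM (what is proved, stated in full; the proofs are below) =====
def Claim_equal_StringChallenge : Prop := ∀ (strParam : String), Dom_StringChallenge strParam → Spec_StringChallenge strParam (StringChallenge strParam)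

-- ===== LEMMAS AND PROOFS =====

-- the right-hand side of the main invariant: tokenize the rest of the pattern, then match
def SCrhs (patron cadena : List Char) (i pos : Nat) : String :=
  match SCb_tokenize patron i [] with
  | none => "false"
  | some ts => SCb_match cadena pos ts

theorem SCb_scanClose_le (p : List Char) (j : Nat) (h : j ≤ p.length) :
    SCb_scanClose p j ≤ p.length := by
  induction j using SCb_scanClose.induct p with
  | case1 j h1 hbrace => rw [SCb_scanClose]; rw [dif_pos h1, if_pos hbrace]; omega
  | case2 j h1 hbrace ih => rw [SCb_scanClose]; rw [dif_pos h1, if_neg hbrace]; exact ih (by omega)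
  | case3 j h1 => rw [SCb_scanClose]; rw [dif_neg h1]; omega

-- A's incremental n_str scan computes the stop index of B's scan and the slice p[j:stop]
theorem SC_scanBrace_eq (p : List Char) : ∀ (j : Nat) (acc : List Char),
    SCa_scanBrace p j acc
      = (SCb_scanClose p j, acc ++ (p.drop j).take (SCb_scanClose p j - j)) := by
  intro j acc
  induction j, acc using SCa_scanBrace.induct p with
  | case1 j acc h1 hbrace =>
    rw [SCa_scanBrace, SCb_scanClose]
    rw [dif_pos h1, dif_pos h1, if_pos hbrace, if_pos hbrace]
    simp
  | case2 j acc h1 hbrace ih =>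
    rw [SCa_scanBrace, SCb_scanClose]
    rw [dif_pos h1, dif_pos h1, if_neg hbrace, if_neg hbrace]
    rw [ih]
    have hge : j + 1 ≤ SCb_scanClose p (j + 1) := SCb_scanClose_ge p (j + 1)
    have hdrop : p.drop j = p.getD j ' ' :: p.drop (j + 1) := by
      rw [List.getD_eq_getElem p ' ' h1]
      exact List.drop_eq_getElem_cons h1
    rw [hdrop]
    have : SCb_scanClose p (j + 1) - j = (SCb_scanClose p (j + 1) - (j + 1)) + 1 := by omega
    rw [this, List.take_succ_cons]
    simp
  | case3 j acc h1 =>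
    rw [SCa_scanBrace, SCb_scanClose]
    rw [dif_neg h1, dif_neg h1]
    have : p.drop j = [] := List.drop_eq_nil_of_le (by omega)
    simp [this]

-- running the tokenizer with accumulator acc prepends acc to the result
theorem SCb_tokenize_acc (p : List Char) : ∀ (N i : Nat) (acc : List SCTok),
    p.length - i ≤ N →
    SCb_tokenize p i acc = (SCb_tokenize p i []).map (acc ++ ·) := by
  intro N
  induction N with
  | zero =>
    intro i acc hN
    have hi : ¬ i < p.length := by omega
    conv_lhs => rw [SCb_tokenize]
    conv_rhs => rw [SCb_tokenize]
    simp only [dif_neg hi]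
    simp
  | succ N ih =>
    intro i acc hN
    by_cases hi : i < p.length
    · conv_lhs => rw [SCb_tokenize]
      conv_rhs => rw [SCb_tokenize]
      simp only [dif_pos hi, List.nil_append]
      by_cases h1 : p.getD i ' ' = '+'
      · simp only [if_pos h1]
        rw [ih (i+1) (acc ++ [SCTok.plus]) (by omega), ih (i+1) [SCTok.plus] (by omega)]
        cases SCb_tokenize p (i+1) [] <;> simp
      · by_cases h2 : p.getD i ' ' = '$'
        · simp only [if_neg h1, if_pos h2]
          rw [ih (i+1) (acc ++ [SCTok.dollar]) (by omega), ih (i+1) [SCTok.dollar] (by omega)]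
          cases SCb_tokenize p (i+1) [] <;> simp
        · by_cases h3 : p.getD i ' ' = '*'
          · simp only [if_neg h1, if_neg h2, if_pos h3]
            by_cases hbr : i + 1 < p.length ∧ p.getD (i+1) ' ' = '{'
            · simp only [if_pos hbr]
              have hj2 : i + 2 ≤ SCb_scanClose p (i + 2) := SCb_scanClose_ge p (i + 2)
              by_cases hjl : SCb_scanClose p (i + 2) = p.length
              · simp only [if_pos hjl]; rfl
              · simp only [if_neg hjl]
                by_cases hdig : PySem.Chars.strIsdigit
                    ((p.drop (i+2)).take (SCb_scanClose p (i+2) - (i+2))) = true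
                · simp only [if_pos hdig]
                  cases hof : PySem.Int.ofChars?
                      ((p.drop (i+2)).take (SCb_scanClose p (i+2) - (i+2))) with
                  | none => rfl
                  | some n =>
                    dsimp only
                    by_cases hn : n < 1
                    · simp only [if_pos hn]; rfl
                    · simp only [if_neg hn]
                      rw [ih (SCb_scanClose p (i+2) + 1) (acc ++ [SCTok.rep n.toNat]) (by omega),
                          ih (SCb_scanClose p (i+2) + 1) [SCTok.rep n.toNat] (by omega)]
                      cases SCb_tokenize p (SCb_scanClose p (i+2) + 1) [] <;> simp
                · simp only [if_neg hdig]; rfl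
            · simp only [if_neg hbr]
              rw [ih (i+1) (acc ++ [SCTok.rep 3]) (by omega), ih (i+1) [SCTok.rep 3] (by omega)]
              cases SCb_tokenize p (i+1) [] <;> simp
          · simp only [if_neg h1, if_neg h2, if_neg h3]; rfl
    · conv_lhs => rw [SCb_tokenize]
      conv_rhs => rw [SCb_tokenize]
      simp only [dif_neg hi]; simp

-- A's range(n)-loop check is B's slice-vs-replicate check
theorem SC_rep_check (cadena : List Char) (pos n : Nat) (h : pos + n ≤ cadena.length) :
    ((List.range n).all (fun k => cadena.getD (pos + k) ' ' == cadena.getD pos ' ') = true) ↔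
    ((cadena.drop pos).take n = List.replicate n (cadena.getD pos ' ')) := by
  rw [List.all_eq_true]
  simp only [List.mem_range, beq_iff_eq]
  rw [List.eq_replicate_iff]
  have hlen : ((cadena.drop pos).take n).length = n := by
    simp [List.length_take, List.length_drop]; omega
  constructor
  · intro hall
    refine ⟨hlen, ?_⟩
    intro b hb
    obtain ⟨k, hk, hbk⟩ := List.getElem_of_mem hb
    rw [hlen] at hk
    rw [← hbk, List.getElem_take, List.getElem_drop]
    rw [← List.getD_eq_getElem cadena ' ' (by omega)]
    exact hall k hk
  · intro ⟨_, hall⟩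
    intro k hk
    have hmem : cadena.getD (pos + k) ' ' ∈ (cadena.drop pos).take n := by
      rw [List.getD_eq_getElem cadena ' ' (by omega)]
      have : cadena[pos + k]'(by omega) = ((cadena.drop pos).take n)[k]'(by omega) := by
        rw [List.getElem_take, List.getElem_drop]
      rw [this]
      exact List.getElem_mem _
    exact hall _ hmem

-- a nonempty pattern suffix that tokenizes yields a token list that cannot match an exhausted string
theorem SC_tokenize_end (p cadena : List Char) (i : Nat) (hi : i < p.length) (ts : List SCTok)
    (h : SCb_tokenize p i [] = some ts) : SCb_match cadena cadena.length ts = "false" := by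
  rw [SCb_tokenize, dif_pos hi] at h
  simp only [List.nil_append] at h
  by_cases h1 : p.getD i ' ' = '+'
  · rw [if_pos h1, SCb_tokenize_acc p p.length (i+1) [SCTok.plus] (by omega)] at h
    cases htk : SCb_tokenize p (i+1) [] with
    | none => rw [htk] at h; simp at h
    | some l =>
      rw [htk] at h
      simp only [Option.map_some, Option.some.injEq] at h
      rw [← h]
      simp only [List.singleton_append, SCb_match]
      rw [if_pos (Or.inl (by omega))]
  · by_cases h2 : p.getD i ' ' = '$'
    · rw [if_neg h1, if_pos h2, SCb_tokenize_acc p p.length (i+1) [SCTok.dollar] (by omega)] at h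
      cases htk : SCb_tokenize p (i+1) [] with
      | none => rw [htk] at h; simp at h
      | some l =>
        rw [htk] at h
        simp only [Option.map_some, Option.some.injEq] at h
        rw [← h]
        simp only [List.singleton_append, SCb_match]
        rw [if_pos (Or.inl (by omega))]
    · by_cases h3 : p.getD i ' ' = '*'
      · rw [if_neg h1, if_neg h2, if_pos h3] at h
        by_cases hbr : i + 1 < p.length ∧ p.getD (i+1) ' ' = '{'
        · rw [if_pos hbr] at h
          by_cases hjl : SCb_scanClose p (i + 2) = p.length
          · rw [if_pos hjl] at h; simp at h
          · rw [if_neg hjl] at h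
            by_cases hdig : PySem.Chars.strIsdigit
                ((p.drop (i+2)).take (SCb_scanClose p (i+2) - (i+2))) = true
            · rw [if_pos hdig] at h
              cases hof : PySem.Int.ofChars?
                  ((p.drop (i+2)).take (SCb_scanClose p (i+2) - (i+2))) with
              | none => rw [hof] at h; simp at h
              | some n =>
                rw [hof] at h
                dsimp only at h
                by_cases hn : n < 1
                · rw [if_pos hn] at h; simp at h
                · rw [if_neg hn,
                      SCb_tokenize_acc p p.length (SCb_scanClose p (i+2) + 1) [SCTok.rep n.toNat] (by omega)] at h
                  cases htk : SCb_tokenize p (SCb_scanClose p (i+2) + 1) [] with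
                  | none => rw [htk] at h; simp at h
                  | some l =>
                    rw [htk] at h
                    simp only [Option.map_some, Option.some.injEq] at h
                    rw [← h]
                    simp only [List.singleton_append, SCb_match]
                    rw [if_pos (Or.inl (by omega))]
            · rw [if_neg hdig] at h; simp at h
        · rw [if_neg hbr,
              SCb_tokenize_acc p p.length (i+1) [SCTok.rep 3] (by omega)] at h
          cases htk : SCb_tokenize p (i+1) [] with
          | none => rw [htk] at h; simp at h
          | some l =>
            rw [htk] at h
            simp only [Option.map_some, Option.some.injEq] at h
            rw [← h]
            simp only [List.singleton_append, SCb_match]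
            rw [if_pos (Or.inl (by omega))]
      · rw [if_neg h1, if_neg h2, if_neg h3] at h; simp at h

theorem SC_terminal (patron cadena : List Char) (pos : Nat) :
    SCa_loop patron cadena patron.length pos = SCrhs patron cadena patron.length pos := by
  rw [SCa_loop]
  unfold SCrhs
  rw [SCb_tokenize]
  simp [SCb_match]

-- A's bare-* triple comparison is B's 3-slice-vs-replicate check
theorem SC_rep3_check (cadena : List Char) (pos : Nat) (h : pos + 3 ≤ cadena.length) :
    ((cadena.getD pos ' ' == cadena.getD pos ' ' &&
      cadena.getD (pos + 1) ' ' == cadena.getD pos ' ' &&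
      cadena.getD (pos + 2) ' ' == cadena.getD pos ' ') = true) ↔
    ((cadena.drop pos).take 3 = List.replicate 3 (cadena.getD pos ' ')) := by
  rw [← SC_rep_check cadena pos 3 h]
  have hr : List.range 3 = [0, 1, 2] := by decide
  rw [hr]
  simp

-- A's '$' check (a Bool on one char) stated as B's Prop condition
theorem SC_dollar_cond (c : Char) :
    ((!(PySem.Chars.isdigit c && !(c == '0'))) = true) ↔
    ¬(PySem.Chars.isdigit c = true ∧ c ≠ '0') := by
  cases h : PySem.Chars.isdigit c <;> by_cases hz : c = '0' <;> simp [h, hz]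

-- main invariant: A's loop state (i, pos) equals tokenizing the pattern from i and matching from pos
theorem SC_main (patron cadena : List Char) : ∀ (N i pos : Nat),
    patron.length - i ≤ N → i ≤ patron.length → pos ≤ cadena.length →
    SCa_loop patron cadena i pos = SCrhs patron cadena i pos := by
  intro N
  induction N with
  | zero =>
    intro i pos hN hi _hpos
    have hieq : i = patron.length := by omega
    subst hieq
    exact SC_terminal patron cadena pos
  | succ N ih =>
    intro i pos hN hi hpos
    by_cases hieq : i = patron.length
    · subst hieq; exact SC_terminal patron cadena pos
    have hi' : i < patron.length := by omega
    by_cases hpe : pos = cadena.length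
    · subst hpe
      rw [SCa_loop,
          dif_neg (by omega : ¬(i < patron.length ∧ cadena.length < cadena.length)),
          if_neg (by omega : ¬(i = patron.length ∧ cadena.length = cadena.length))]
      unfold SCrhs
      cases htk : SCb_tokenize patron i [] with
      | none => rfl
      | some ts => exact (SC_tokenize_end patron cadena i hi' ts htk).symm
    have hpos' : pos < cadena.length := by omega
    rw [SCa_loop, dif_pos ⟨hi', hpos'⟩]
    unfold SCrhs
    conv_rhs => rw [SCb_tokenize]
    simp only [dif_pos hi', List.nil_append]
    by_cases h1 : patron.getD i ' ' = '+'
    · simp only [if_pos h1]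
      rw [SCb_tokenize_acc patron patron.length (i + 1) [SCTok.plus] (by omega)]
      have ihx := ih (i + 1) (pos + 1) (by omega) (by omega) (by omega)
      unfold SCrhs at ihx
      cases ha : PySem.Chars.isalpha (cadena.getD pos ' ')
      · rw [if_pos (by decide : (!false) = true)]
        cases htk : SCb_tokenize patron (i + 1) [] with
        | none => rfl
        | some ts =>
          simp only [Option.map_some, List.singleton_append]
          rw [SCb_match]; rw [if_pos (Or.inr (by rw [ha]; decide))]
      · rw [if_neg (by decide : ¬(!true) = true)]
        cases htk : SCb_tokenize patron (i + 1) [] with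
        | none => rw [htk] at ihx; exact ihx
        | some ts =>
          rw [htk] at ihx
          simp only [Option.map_some, List.singleton_append]
          rw [SCb_match]; rw [if_neg (by push_neg; exact ⟨by omega, ha⟩)]
          exact ihx
    · simp only [if_neg h1]
      by_cases h2 : patron.getD i ' ' = '$'
      · simp only [if_pos h2]
        rw [SCb_tokenize_acc patron patron.length (i + 1) [SCTok.dollar] (by omega)]
        have ihx := ih (i + 1) (pos + 1) (by omega) (by omega) (by omega)
        unfold SCrhs at ihx
        by_cases hds : PySem.Chars.isdigit (cadena.getD pos ' ') = true ∧ cadena.getD pos ' ' ≠ '0'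
        · rw [if_neg (by rw [SC_dollar_cond]; exact not_not_intro hds)]
          cases htk : SCb_tokenize patron (i + 1) [] with
          | none => rw [htk] at ihx; exact ihx
          | some ts =>
            rw [htk] at ihx
            simp only [Option.map_some, List.singleton_append]
            rw [SCb_match]; rw [if_neg (by push_neg; exact ⟨by omega, hds⟩)]
            exact ihx
        · rw [if_pos ((SC_dollar_cond _).mpr hds)]
          cases htk : SCb_tokenize patron (i + 1) [] with
          | none => rfl
          | some ts =>
            simp only [Option.map_some, List.singleton_append]
            rw [SCb_match]; rw [if_pos (Or.inr hds)]
      · simp only [if_neg h2]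
        by_cases h3 : patron.getD i ' ' = '*'
        · simp only [if_pos h3]
          by_cases hbr : i + 1 < patron.length ∧ patron.getD (i + 1) ' ' = '{'
          · simp only [if_pos hbr]
            rw [SC_scanBrace_eq patron (i + 2) []]
            simp only [List.nil_append]
            have hj2 : i + 2 ≤ SCb_scanClose patron (i + 2) := SCb_scanClose_ge patron (i + 2)
            have hjle : SCb_scanClose patron (i + 2) ≤ patron.length :=
              SCb_scanClose_le patron (i + 2) (by omega)
            by_cases hjl : SCb_scanClose patron (i + 2) = patron.length
            · rw [if_pos hjl,
                  if_neg (by omega :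
                    ¬(SCb_scanClose patron (i + 2) < patron.length ∧
                      PySem.Chars.strIsdigit
                        ((patron.drop (i + 2)).take (SCb_scanClose patron (i + 2) - (i + 2))) = true))]
            · rw [if_neg hjl]
              by_cases hdig : PySem.Chars.strIsdigit
                  ((patron.drop (i + 2)).take (SCb_scanClose patron (i + 2) - (i + 2))) = true
              · rw [if_pos hdig, if_pos ⟨by omega, hdig⟩]
                cases hof : PySem.Int.ofChars?
                    ((patron.drop (i + 2)).take (SCb_scanClose patron (i + 2) - (i + 2))) with
                | none => rfl
                | some n =>
                  dsimp only
                  by_cases hn : n < 1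
                  · rw [if_pos hn,
                        if_neg (by omega : ¬(1 ≤ n ∧ (pos : Int) + n ≤ (cadena.length : Int)))]
                  · rw [if_neg hn,
                        SCb_tokenize_acc patron patron.length (SCb_scanClose patron (i + 2) + 1)
                          [SCTok.rep n.toNat] (by omega)]
                    by_cases hfit : pos + n.toNat ≤ cadena.length
                    · rw [if_pos (⟨by omega, by omega⟩ :
                          1 ≤ n ∧ (pos : Int) + n ≤ (cadena.length : Int))]
                      have ihx := ih (SCb_scanClose patron (i + 2) + 1) (pos + n.toNat)
                        (by omega) (by omega) (by omega)
                      unfold SCrhs at ihx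
                      cases htk : SCb_tokenize patron (SCb_scanClose patron (i + 2) + 1) [] with
                      | none =>
                        rw [htk] at ihx
                        by_cases hchk : ((List.range n.toNat).all
                            (fun k => cadena.getD (pos + k) ' ' == cadena.getD pos ' ')) = true
                        · rw [if_pos hchk]; exact ihx
                        · rw [if_neg hchk]; rfl
                      | some ts =>
                        rw [htk] at ihx
                        simp only [Option.map_some, List.singleton_append]
                        rw [SCb_match]
                        by_cases hchk : ((List.range n.toNat).all
                            (fun k => cadena.getD (pos + k) ' ' == cadena.getD pos ' ')) = true
                        · have hrep := (SC_rep_check cadena pos n.toNat (by omega)).mp hchk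
                          rw [if_pos hchk, if_neg (by push_neg; exact ⟨by omega, hrep⟩)]
                          exact ihx
                        · have hrep : ¬ ((cadena.drop pos).take n.toNat
                              = List.replicate n.toNat (cadena.getD pos ' ')) :=
                            fun hr => hchk ((SC_rep_check cadena pos n.toNat (by omega)).mpr hr)
                          rw [if_neg hchk, if_pos (Or.inr hrep)]
                    · rw [if_neg (by omega : ¬(1 ≤ n ∧ (pos : Int) + n ≤ (cadena.length : Int)))]
                      cases htk : SCb_tokenize patron (SCb_scanClose patron (i + 2) + 1) [] with
                      | none => rfl
                      | some ts =>
                        simp only [Option.map_some, List.singleton_append]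
                        rw [SCb_match]; rw [if_pos (Or.inl (by omega))]
              · rw [if_neg hdig,
                    if_neg (by simp [hdig] :
                      ¬(SCb_scanClose patron (i + 2) < patron.length ∧
                        PySem.Chars.strIsdigit
                          ((patron.drop (i + 2)).take (SCb_scanClose patron (i + 2) - (i + 2))) = true))]
          · simp only [if_neg hbr]
            rw [SCb_tokenize_acc patron patron.length (i + 1) [SCTok.rep 3] (by omega)]
            by_cases hfit : pos + 3 ≤ cadena.length
            · rw [if_pos hfit]
              have ihx := ih (i + 1) (pos + 3) (by omega) (by omega) (by omega)
              unfold SCrhs at ihx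
              cases htk : SCb_tokenize patron (i + 1) [] with
              | none =>
                rw [htk] at ihx
                by_cases hb3 : (cadena.getD pos ' ' == cadena.getD pos ' ' &&
                    cadena.getD (pos + 1) ' ' == cadena.getD pos ' ' &&
                    cadena.getD (pos + 2) ' ' == cadena.getD pos ' ') = true
                · rw [if_pos hb3]; exact ihx
                · rw [if_neg hb3]; rfl
              | some ts =>
                rw [htk] at ihx
                simp only [Option.map_some, List.singleton_append]
                rw [SCb_match]
                by_cases hb3 : (cadena.getD pos ' ' == cadena.getD pos ' ' &&
                    cadena.getD (pos + 1) ' ' == cadena.getD pos ' ' &&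
                    cadena.getD (pos + 2) ' ' == cadena.getD pos ' ') = true
                · rw [if_pos hb3,
                      if_neg (by push_neg; exact ⟨by omega, (SC_rep3_check cadena pos hfit).mp hb3⟩)]
                  exact ihx
                · rw [if_neg hb3,
                      if_pos (Or.inr (fun hr => hb3 ((SC_rep3_check cadena pos hfit).mpr hr)))]
            · rw [if_neg hfit]
              cases htk : SCb_tokenize patron (i + 1) [] with
              | none => rfl
              | some ts =>
                simp only [Option.map_some, List.singleton_append]
                rw [SCb_match]
                exact (if_pos (Or.inl (by omega : cadena.length < pos + 3))).symm
        · simp only [if_neg h3]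

-- ===== VERDICT (by name: the statement is the Claim_ definition above) =====
theorem StringChallenge_spec : Claim_equal_StringChallenge := by
  intro s _hdom
  unfold Spec_StringChallenge StringChallenge StringChallenge_alt
  cases h : PySem.Chars.splitMax? (PySem.Chars.strip s.toList) [' '] 1 with
  | none => rfl
  | some l =>
    rcases l with _ | ⟨p, _ | ⟨c, _ | ⟨d, rest⟩⟩⟩
    · rfl
    · rfl
    · exact SC_main p c p.length 0 0 (by omega) (by omega) (by omega)
    · rfl
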